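-- pv_equiv track=rewrite | github.com/kitfai/eroses | ajk-code/ajk_withprefix.py | get_next_line_block
-- ===== SOURCE A (Python) =====
-- def get_next_line_block(blocks, current_block_id):
--     """
--     Helper method to get the next line block in the document
--     """
--     current_block_index = None
--
--     # Find the current block index
--     for i, block in enumerate(blocks):
--         if block.get('Id') == current_block_id:
--             current_block_index = i
--             break
--
--     if current_block_index is not None:
--         # Look for the next LINE block
--         for block in blocks[current_block_index + 1:]:
--             if block['BlockType'] == 'LINE':
--                 return block
--
--     return None
-- ===== SOURCE B (Python) =====
-- def get_next_line_block(blocks, current_block_id):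
--     """
--     Helper method to get the next line block in the document
--     """
--     ans = None
--     first_line = None
--     for block in reversed(blocks):
--         if block.get('Id') == current_block_id:
--             ans = first_line
--         if block.get('BlockType') == 'LINE':
--             first_line = block
--     return ans
-- ===== Notes on version B (the rewrite author's own statement) =====
-- stated objective: alternative
-- what changed: Replaces A's two forward scans (enumerate to find the marker index, then a scan over the slice blocks[i+1:]) by a single backwards traversal carrying two accumulators: the first LINE block of the suffix seen so far, and the answer for the leftmost marker seen so far.
import Mathlib
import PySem

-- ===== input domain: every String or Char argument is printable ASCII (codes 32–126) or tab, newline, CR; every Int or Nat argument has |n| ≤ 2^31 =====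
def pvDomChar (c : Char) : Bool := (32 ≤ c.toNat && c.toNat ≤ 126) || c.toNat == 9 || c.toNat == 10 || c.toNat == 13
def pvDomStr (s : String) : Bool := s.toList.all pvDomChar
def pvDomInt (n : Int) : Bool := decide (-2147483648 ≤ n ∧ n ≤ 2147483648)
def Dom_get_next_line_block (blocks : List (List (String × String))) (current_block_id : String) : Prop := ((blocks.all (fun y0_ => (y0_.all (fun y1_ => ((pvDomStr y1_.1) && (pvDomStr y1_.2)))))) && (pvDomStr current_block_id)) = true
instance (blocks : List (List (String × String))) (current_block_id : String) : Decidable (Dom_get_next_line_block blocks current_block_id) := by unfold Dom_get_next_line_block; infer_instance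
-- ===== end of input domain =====

-- B replaces A's two forward scans (index-find then slice-scan) by one backwards traversal with two accumulators (first LINE of the suffix, answer so far): a genuinely different decomposition, same O(n) cost.


-- dict.get(k) on an association list: first match (Python dicts have unique keys; first match is the convention)
def pvLookup (d : List (String × String)) (k : String) : Option String :=
  match d with
  | [] => none
  | (k', v) :: rest => if k' == k then some v else pvLookup rest k

-- ===== PORT A =====
-- first loop: 'for i, block in enumerate(blocks): if block.get('Id') == current_block_id: current_block_index = i; break'
def pvA_findIndex (blocks : List (List (String × String))) (current_block_id : String) (i : Nat) : Option Nat :=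
  match blocks with
  | [] => none
  | b :: rest => if pvLookup b "Id" == some current_block_id then some i
                 else pvA_findIndex rest current_block_id (i + 1)

-- second loop: 'for block in blocks[current_block_index+1:]: if block['BlockType'] == 'LINE': return block'
-- (a block with no 'BlockType' key is a Python KeyError; such inputs are excluded by Pre_, here the scan skips)
def pvA_scanLine (blocks : List (List (String × String))) : Option (List (String × String)) :=
  match blocks with
  | [] => none
  | b :: rest =>
    match pvLookup b "BlockType" with
    | some t => if t == "LINE" then some b else pvA_scanLine rest
    | none => pvA_scanLine rest

def get_next_line_block (blocks : List (List (String × String))) (current_block_id : String) : Option (List (String × String)) :=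
  match pvA_findIndex blocks current_block_id 0 with
  | some i => pvA_scanLine (PySem.List.slice blocks (some ((i : Int) + 1)) none)
  | none => none

-- ===== PORT B =====
-- 'for block in reversed(blocks)': structural recursion that processes the tail (the later blocks) first,
-- threading the pair (ans, first_line); head updates happen after the tail, i.e. right-to-left as in Source B
def pvB_go (blocks : List (List (String × String))) (current_block_id : String) :
    Option (List (String × String)) × Option (List (String × String)) :=
  match blocks with
  | [] => (none, none)
  | b :: rest =>
    let p := pvB_go rest current_block_id
    let ans := if pvLookup b "Id" == some current_block_id then p.2 else p.1
    let fl := if pvLookup b "BlockType" == some "LINE" then some b else p.2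
    (ans, fl)

def get_next_line_block_alt (blocks : List (List (String × String))) (current_block_id : String) : Option (List (String × String)) :=
  (pvB_go blocks current_block_id).1

-- ===== PRECONDITION & SPEC =====
-- Pre_ excludes exactly the inputs where Python A raises KeyError: some block strictly after the
-- first block whose 'Id' equals current_block_id lacks the 'BlockType' key and no earlier block of that
-- suffix is a LINE block.
def Pre_get_next_line_block (blocks : List (List (String × String))) (current_block_id : String) : Prop :=
  let s := (blocks.dropWhile (fun b => ¬ (b.lookup "Id" == some current_block_id))).drop 1
  ∀ j ∈ List.range s.length, ∀ b, s[j]? = some b → b.lookup "BlockType" = none →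
    ∃ k ∈ List.range j, ∃ c, s[k]? = some c ∧ c.lookup "BlockType" = some "LINE"
instance (blocks : List (List (String × String))) (current_block_id : String) : Decidable (Pre_get_next_line_block blocks current_block_id) := by unfold Pre_get_next_line_block; infer_instance

def pvWitness_get_next_line_block : (List (List (String × String))) × String :=
  ([[("Id", "1")], [("Id", "2"), ("BlockType", "LINE")]], "1")

def Spec_get_next_line_block (blocks : List (List (String × String))) (current_block_id : String) (out : Option (List (String × String))) : Prop := out = get_next_line_block_alt blocks current_block_id
instance (blocks : List (List (String × String))) (current_block_id : String) (out : Option (List (String × String))) : Decidable (Spec_get_next_line_block blocks current_block_id out) := by unfold Spec_get_next_line_block; infer_instance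

-- ===== CLAIM (what is proved, stated in full; the proofs are below) =====
def Claim_equal_get_next_line_block : Prop := ∀ (blocks : List (List (String × String))) (current_block_id : String), Dom_get_next_line_block blocks current_block_id → Pre_get_next_line_block blocks current_block_id → Spec_get_next_line_block blocks current_block_id (get_next_line_block blocks current_block_id)

-- ===== LEMMAS AND PROOFS =====

-- the A-side index search, started at i+1, yields exactly one more than started at i
theorem pvA_findIndex_succ (blocks : List (List (String × String))) (id : String) (i : Nat) :
    pvA_findIndex blocks id (i + 1) = (pvA_findIndex blocks id i).map (· + 1) := by
  induction blocks generalizing i with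
  | nil => rfl
  | cons b rest ih =>
    simp only [pvA_findIndex]
    split
    · rfl
    · exact ih (i + 1)

-- B's second accumulator is exactly A's second scan over the same suffix
theorem pvB_go_snd (blocks : List (List (String × String))) (id : String) :
    (pvB_go blocks id).2 = pvA_scanLine blocks := by
  induction blocks with
  | nil => rfl
  | cons b rest ih =>
    simp only [pvB_go, pvA_scanLine]
    by_cases h : pvLookup b "BlockType" == some "LINE"
    · have := (beq_iff_eq).mp h
      simp [this]
    · cases hl : pvLookup b "BlockType" with
      | none => simp [hl] at h ⊢; exact ih
      | some t =>
        have ht : ¬ (t == "LINE") = true := by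
          intro hc; apply h; rw [hl]; simpa using hc
        simp [hl, ht] at h ⊢
        exact ih

-- the unconditional equivalence of the two ports
theorem ports_eq (blocks : List (List (String × String))) (id : String) :
    get_next_line_block blocks id = get_next_line_block_alt blocks id := by
  induction blocks with
  | nil => rfl
  | cons b rest ih =>
    unfold get_next_line_block get_next_line_block_alt pvB_go
    simp only [pvA_findIndex]
    by_cases h : pvLookup b "Id" == some id
    · simp only [h, if_pos]
      have : ((0 : Nat) : Int) + 1 = ((1 : Nat) : Int) := by norm_num
      rw [this, PySem.List.slice_from_natCast]
      simpa using (pvB_go_snd rest id).symm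
    · simp only [h, Bool.false_eq_true, if_false]
      rw [pvA_findIndex_succ]
      unfold get_next_line_block get_next_line_block_alt at ih
      cases hfi : pvA_findIndex rest id 0 with
      | none => simpa [hfi] using ih
      | some i =>
        rw [hfi] at ih
        simp only [Option.map_some]
        have e1 : PySem.List.slice (b :: rest) (some (((i + 1 : Nat) : Int) + 1)) none
            = PySem.List.slice rest (some ((i : Int) + 1)) none := by
          have h1 : (((i + 1 : Nat) : Int) + 1) = ((i + 2 : Nat) : Int) := by push_cast; ring
          have h2 : ((i : Int) + 1) = ((i + 1 : Nat) : Int) := by push_cast; ring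
          rw [h1, h2, PySem.List.slice_from_natCast, PySem.List.slice_from_natCast]
          rfl
        rw [e1]; simpa using ih

-- ===== VERDICT (by name: the statement is the Claim_ definition above) =====
theorem get_next_line_block_spec : Claim_equal_get_next_line_block := by
  intro blocks id _ _
  unfold Spec_get_next_line_block
  exact ports_eq blocks id
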